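-- pv_equiv track=rewrite | github.com/zlliu246/pprint_tree | src/pprint_tree/helpers/string_helper.py | remove_unneccesary_columns
-- ===== SOURCE A (Python) =====
-- def remove_unneccesary_columns(lines_to_print: list[str]) -> list[str]:
--     """
--     Columns are deliberately made long at first to accomodate screwups. Remove them now.
--     """
--     col_indexes_to_remove: set[int] = set()
--     col_index: int = 0
--
--     longest_line_length: int = max(len(line) for line in lines_to_print)
--
--     while col_index < longest_line_length:
--         char_set: set[str] = set()
--
--         for line in lines_to_print:
--             if col_index < len(line):
--                 char_set.add(line[col_index])
--             if col_index - 1 >= 0 and col_index - 1 < len(line):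
--                 char_set.add(line[col_index - 1])
--             if col_index + 1 < len(line):
--                 char_set.add(line[col_index + 1])
--
--         # if char_set only contains " " or "_", remove
--         if char_set == {" "} or char_set == {"_"} or char_set == {" ", "_"}:
--             col_indexes_to_remove.add(col_index)
--
--         col_index += 1
--
--     line_lists: list[list[str]] = [list(line) for line in lines_to_print]
--     for line_list in line_lists:
--         for col_index in col_indexes_to_remove:
--             if col_index >= len(line_list):
--                 continue
--             line_list[col_index] = ""
--
--     return ["".join(line_list) for line_list in line_lists]
-- ===== SOURCE B (Python) =====
-- def remove_unneccesary_columns(lines_to_print: list[str]) -> list[str]: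
--     """
--     Columns are deliberately made long at first to accomodate screwups. Remove them now.
--     """
--     longest_line_length: int = max(len(line) for line in lines_to_print)
--
--     # one pass per column: blank[c] iff every character in column c is ' ' or '_'
--     blank: list[bool] = [
--         all(line[c] in " _" for line in lines_to_print if c < len(line))
--         for c in range(longest_line_length)
--     ]
--
--     def window_blank(c: int) -> bool:
--         # out-of-range neighbours count as blank
--         return c < 0 or c >= longest_line_length or blank[c]
--
--     return [
--         "".join(ch for c, ch in enumerate(line)
--                 if not (window_blank(c - 1) and window_blank(c) and window_blank(c + 1)))
--         for line in lines_to_print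
--     ]
-- ===== Notes on version B (the rewrite author's own statement) =====
-- stated objective: alternative
-- what changed: A rebuilds a 3-wide neighbour character set per column over all lines and then blanks cells inside mutable per-line cell lists; B computes a per-column blankness table in one pass, decides removal by a 3-column window test over that table, and rebuilds each line by filtering kept indices.
import Mathlib
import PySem

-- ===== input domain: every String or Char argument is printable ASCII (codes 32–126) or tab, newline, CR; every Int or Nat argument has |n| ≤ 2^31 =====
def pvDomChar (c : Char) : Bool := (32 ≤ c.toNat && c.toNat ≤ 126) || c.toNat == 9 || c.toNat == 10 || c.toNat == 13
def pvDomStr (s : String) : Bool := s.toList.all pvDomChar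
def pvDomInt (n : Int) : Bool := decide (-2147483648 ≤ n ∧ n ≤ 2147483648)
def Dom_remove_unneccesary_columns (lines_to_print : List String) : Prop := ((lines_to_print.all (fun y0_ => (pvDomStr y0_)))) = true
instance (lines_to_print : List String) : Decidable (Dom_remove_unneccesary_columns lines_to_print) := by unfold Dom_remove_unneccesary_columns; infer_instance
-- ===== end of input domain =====

-- B replaces A's per-column 3-wide character-set rebuild and mutable cell-blanking with a one-pass
-- per-column blankness table, a 3-column window test over it, and an index filter per line
-- (alternative decomposition, same cost). Return-value equivalence; neither version mutates its argument.

-- ===== PORT A =====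
-- char_set for one column: for each line, add line[col], line[col-1] (if col ≥ 1), line[col+1], when in range
def pvA_step1 (col : Nat) (s : PySem.Set Char) (line : List Char) : PySem.Set Char :=
  if col < line.length then PySem.Set.add s (line.getD col ' ') else s
def pvA_step2 (col : Nat) (s : PySem.Set Char) (line : List Char) : PySem.Set Char :=
  if 1 ≤ col ∧ col - 1 < line.length then PySem.Set.add s (line.getD (col - 1) ' ') else s
def pvA_step3 (col : Nat) (s : PySem.Set Char) (line : List Char) : PySem.Set Char :=
  if col + 1 < line.length then PySem.Set.add s (line.getD (col + 1) ' ') else s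
def pvA_step (col : Nat) (s : PySem.Set Char) (line : List Char) : PySem.Set Char :=
  pvA_step3 col (pvA_step2 col (pvA_step1 col s line) line) line
def pvA_charSet (ls : List (List Char)) (col : Nat) : PySem.Set Char :=
  ls.foldl (pvA_step col) PySem.Set.empty

-- char_set == {" "} or char_set == {"_"} or char_set == {" ", "_"}
def pvA_isBlankSet (cs : PySem.Set Char) : Bool :=
  PySem.Set.equal cs (PySem.Set.ofList [' ']) || PySem.Set.equal cs (PySem.Set.ofList ['_']) ||
    PySem.Set.equal cs (PySem.Set.ofList [' ', '_'])

-- the while loop collecting col_indexes_to_remove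
def pvA_removeSet (ls : List (List Char)) (longest : Nat) : PySem.Set Nat :=
  (List.range longest).foldl (fun r col =>
    if pvA_isBlankSet (pvA_charSet ls col) then PySem.Set.add r col else r) PySem.Set.empty

-- 'for col_index in col_indexes_to_remove: line_list[col_index] = ""' (cells as sub-lists; the
-- writes are independent, so folding over the Set's element list is order-insensitive)
def pvA_blankCols (cells : List (List Char)) (cols : List Nat) : List (List Char) :=
  cols.foldl (fun cs col => if col < cs.length then cs.set col [] else cs) cells

def remove_unneccesary_columns (lines_to_print : List String) : List String :=
  let ls := lines_to_print.map String.toList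
  -- max(len(line) for line in lines_to_print); raises on [] — excluded by Pre_
  let longest := ((ls.map List.length).max?).getD 0
  let rem := pvA_removeSet ls longest
  ls.map (fun line => String.ofList (pvA_blankCols (line.map (fun c => [c])) rem).flatten)

-- ===== PORT B =====
-- blank[c]: every line long enough has ' ' or '_' in column c
def pvB_blank (ls : List (List Char)) (c : Nat) : Bool :=
  ls.all (fun line => !(c < line.length) || (line.getD c ' ' == ' ' || line.getD c ' ' == '_'))

-- window_blank: out-of-range columns count as blank (getD default true covers c ≥ longest; c < 0
-- only arises as c-1 at c = 0, covered by the c == 0 test)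
def pvB_blankD (blank : List Bool) (c : Nat) : Bool := blank.getD c true

def pvB_keep (blank : List Bool) (c : Nat) : Bool :=
  !((c == 0 || pvB_blankD blank (c - 1)) && pvB_blankD blank c && pvB_blankD blank (c + 1))

def remove_unneccesary_columns_alt (lines_to_print : List String) : List String :=
  let ls := lines_to_print.map String.toList
  let longest := ((ls.map List.length).max?).getD 0
  let blank := (List.range longest).map (pvB_blank ls)
  ls.map (fun line =>
    String.ofList ((line.zipIdx.filter (fun p => pvB_keep blank p.2)).map (·.1)))

-- ===== PRECONDITION & SPEC =====
-- Pre_ excludes only the empty list, on which A (and B) raise ValueError from max() of an empty sequence.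
def Pre_remove_unneccesary_columns (lines_to_print : List String) : Prop := lines_to_print ≠ []
instance (lines_to_print : List String) : Decidable (Pre_remove_unneccesary_columns lines_to_print) := by
  unfold Pre_remove_unneccesary_columns; infer_instance
def pvWitness_remove_unneccesary_columns : List String := ["a_ b", "c  d"]

def Spec_remove_unneccesary_columns (lines_to_print : List String) (out : List String) : Prop := out = remove_unneccesary_columns_alt lines_to_print
instance (lines_to_print : List String) (out : List String) : Decidable (Spec_remove_unneccesary_columns lines_to_print out) := by unfold Spec_remove_unneccesary_columns; infer_instance

-- ===== CLAIM (what is proved, stated in full; the proofs are below) =====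
def Claim_equal_remove_unneccesary_columns : Prop := ∀ (lines_to_print : List String), Dom_remove_unneccesary_columns lines_to_print → Pre_remove_unneccesary_columns lines_to_print → Spec_remove_unneccesary_columns lines_to_print (remove_unneccesary_columns lines_to_print)

-- ===== LEMMAS AND PROOFS =====

-- membership in A's char_set
def pvA_contrib (col : Nat) (line : List Char) (x : Char) : Prop :=
  (col < line.length ∧ x = line.getD col ' ') ∨
  (1 ≤ col ∧ col - 1 < line.length ∧ x = line.getD (col - 1) ' ') ∨
  (col + 1 < line.length ∧ x = line.getD (col + 1) ' ')

lemma mem_step (col : Nat) (s : PySem.Set Char) (line : List Char) (x : Char) :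
    x ∈ pvA_step col s line ↔ x ∈ s ∨ pvA_contrib col line x := by
  unfold pvA_step pvA_step1 pvA_step2 pvA_step3 pvA_contrib
  split_ifs <;> simp [PySem.Set.mem_add] <;> tauto

lemma mem_charSet_aux (col : Nat) (ls : List (List Char)) (s : PySem.Set Char) (x : Char) :
    x ∈ ls.foldl (pvA_step col) s ↔ x ∈ s ∨ ∃ line ∈ ls, pvA_contrib col line x := by
  induction ls generalizing s with
  | nil => simp
  | cons l t ih =>
    rw [List.foldl_cons, ih, mem_step]
    constructor
    · rintro ((h | h) | ⟨line, hl, hc⟩)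
      · exact Or.inl h
      · exact Or.inr ⟨l, by simp, h⟩
      · exact Or.inr ⟨line, by simp [hl], hc⟩
    · rintro (h | ⟨line, hl, hc⟩)
      · exact Or.inl (Or.inl h)
      · rcases List.mem_cons.mp hl with rfl | hl
        · exact Or.inl (Or.inr hc)
        · exact Or.inr ⟨line, hl, hc⟩

lemma mem_charSet (ls : List (List Char)) (col : Nat) (x : Char) :
    x ∈ pvA_charSet ls col ↔ ∃ line ∈ ls, pvA_contrib col line x := by
  unfold pvA_charSet
  rw [mem_charSet_aux]
  simp [PySem.Set.empty]

-- membership in the conditionally-built remove set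
lemma mem_condAdd (l : List Nat) (Q : Nat → Bool) (s : PySem.Set Nat) (y : Nat) :
    y ∈ l.foldl (fun r c => if Q c then PySem.Set.add r c else r) s ↔ y ∈ s ∨ (y ∈ l ∧ Q y) := by
  induction l generalizing s with
  | nil => simp
  | cons c t ih =>
    rw [List.foldl_cons, ih]
    by_cases hq : Q c
    · simp only [hq, if_true, PySem.Set.mem_add, List.mem_cons]
      constructor
      · rintro ((h | rfl) | h) <;> tauto
      · rintro (h | ⟨(rfl | h), hQ⟩) <;> tauto
    · simp only [hq, List.mem_cons]
      constructor
      · rintro (h | h) <;> tauto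
      · rintro (h | ⟨(rfl | h), hQ⟩) <;> tauto

lemma mem_removeSet (ls : List (List Char)) (longest : Nat) (c : Nat) :
    c ∈ pvA_removeSet ls longest ↔ c < longest ∧ pvA_isBlankSet (pvA_charSet ls c) = true := by
  unfold pvA_removeSet
  rw [mem_condAdd]
  simp [PySem.Set.empty, List.mem_range]

-- the three set-equality tests say: nonempty and every element is ' ' or '_'
lemma isBlankSet_iff (cs : PySem.Set Char) :
    pvA_isBlankSet cs = true ↔ (∃ x, x ∈ cs) ∧ ∀ x ∈ cs, x = ' ' ∨ x = '_' := by
  unfold pvA_isBlankSet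
  simp only [Bool.or_eq_true, PySem.Set.equal_iff, PySem.Set.mem_ofList,
    List.mem_cons, List.not_mem_nil, or_false]
  constructor
  · rintro ((h | h) | h)
    · exact ⟨⟨' ', (h ' ').mpr rfl⟩, fun x hx => Or.inl ((h x).mp hx)⟩
    · exact ⟨⟨'_', (h '_').mpr rfl⟩, fun x hx => Or.inr ((h x).mp hx)⟩
    · exact ⟨⟨' ', (h ' ').mpr (Or.inl rfl)⟩, fun x hx => (h x).mp hx⟩
  · rintro ⟨⟨x, hx⟩, hall⟩
    by_cases hsp : ' ' ∈ cs <;> by_cases hus : '_' ∈ cs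
    · refine Or.inr fun y => ⟨fun hy => hall y hy, fun hy => ?_⟩
      rcases hy with rfl | rfl <;> assumption
    · refine Or.inl (Or.inl fun y => ⟨fun hy => ?_, fun hy => hy ▸ hsp⟩)
      rcases hall y hy with rfl | rfl
      · rfl
      · exact absurd hy hus
    · refine Or.inl (Or.inr fun y => ⟨fun hy => ?_, fun hy => hy ▸ hus⟩)
      rcases hall y hy with rfl | rfl
      · exact absurd hy hsp
      · rfl
    · exfalso; rcases hall x hx with rfl | rfl
      · exact hsp hx
      · exact hus hx

-- max facts
lemma length_le_longest (ls : List (List Char)) (line : List Char) (h : line ∈ ls) :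
    line.length ≤ ((ls.map List.length).max?).getD 0 :=
  List.le_max?_getD_of_mem (List.mem_map_of_mem h)

lemma exists_long_line (ls : List (List Char)) (c : Nat)
    (hc : c < ((ls.map List.length).max?).getD 0) : ∃ line ∈ ls, c < line.length := by
  rcases hm : (ls.map List.length).max? with _ | m
  · simp [hm] at hc
  · have := List.max?_mem hm
    rcases List.mem_map.mp this with ⟨line, hline, hlen⟩
    exact ⟨line, hline, by simp [hm, hlen] at hc ⊢; omega⟩

-- B's blankness table, read with out-of-range default true
lemma blankD_range (ls : List (List Char)) (n c : Nat) :
    pvB_blankD ((List.range n).map (pvB_blank ls)) c = if c < n then pvB_blank ls c else true := by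
  unfold pvB_blankD
  rcases Nat.lt_or_ge c n with h | h
  · rw [List.getD_eq_getElem _ _ (by simpa using h)]
    simp [h]
  · rw [List.getD_eq_default _ _ (by simpa using h)]
    simp [Nat.not_lt.mpr h]

lemma blank_iff (ls : List (List Char)) (c : Nat) :
    pvB_blank ls c = true ↔
      ∀ line ∈ ls, c < line.length → line.getD c ' ' = ' ' ∨ line.getD c ' ' = '_' := by
  unfold pvB_blank
  rw [List.all_eq_true]
  constructor
  · intro h line hl hc
    have := h line hl
    simpa [hc, List.getD] using this
  · intro h line hl
    by_cases hc : c < line.length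
    · simpa [hc, List.getD] using h line hl hc
    · simp [hc]

-- blankD beyond every line's length is vacuously matched by the column being absent everywhere
lemma blankD_iff (ls : List (List Char)) (c : Nat)
    (hbound : ∀ line ∈ ls, line.length ≤ ((ls.map List.length).max?).getD 0) :
    pvB_blankD ((List.range (((ls.map List.length).max?).getD 0)).map (pvB_blank ls)) c = true ↔
      ∀ line ∈ ls, c < line.length → line.getD c ' ' = ' ' ∨ line.getD c ' ' = '_' := by
  rw [blankD_range]
  split_ifs with h
  · exact blank_iff ls c
  · simp only [true_iff]
    intro line hl hc
    exact absurd (Nat.lt_of_lt_of_le hc (hbound line hl)) (by omega)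

-- the central column lemma: A removes column c iff B's 3-wide window is all blank (for c < longest)
lemma remove_iff_window (ls : List (List Char)) (c : Nat)
    (hc : c < ((ls.map List.length).max?).getD 0) :
    c ∈ pvA_removeSet ls (((ls.map List.length).max?).getD 0) ↔
      pvB_keep ((List.range (((ls.map List.length).max?).getD 0)).map (pvB_blank ls)) c = false := by
  set longest := ((ls.map List.length).max?).getD 0 with hlg
  have hbound : ∀ line ∈ ls, line.length ≤ longest := fun l h => length_le_longest ls l h
  rw [mem_removeSet, isBlankSet_iff]
  unfold pvB_keep
  simp only [Bool.not_eq_false', Bool.and_eq_true, Bool.or_eq_true, beq_iff_eq]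
  constructor
  · rintro ⟨-, -, hall⟩
    simp only [mem_charSet] at hall
    refine ⟨⟨?_, ?_⟩, ?_⟩
    · by_cases h0 : c = 0
      · left; exact h0
      · right; rw [blankD_iff ls (c - 1) hbound]
        intro line hl hlen
        exact hall _ ⟨line, hl, Or.inr (Or.inl ⟨by omega, hlen, rfl⟩)⟩
    · rw [blankD_iff ls c hbound]
      intro line hl hlen
      exact hall _ ⟨line, hl, Or.inl ⟨hlen, rfl⟩⟩
    · rw [blankD_iff ls (c + 1) hbound]
      intro line hl hlen
      exact hall _ ⟨line, hl, Or.inr (Or.inr ⟨hlen, rfl⟩)⟩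
  · rintro ⟨⟨h01, hcc⟩, hc1⟩
    rw [blankD_iff ls c hbound] at hcc
    rw [blankD_iff ls (c + 1) hbound] at hc1
    refine ⟨hc, ?_, ?_⟩
    · rcases exists_long_line ls c hc with ⟨line, hl, hlen⟩
      exact ⟨line.getD c ' ', (mem_charSet ls c _).mpr ⟨line, hl, Or.inl ⟨hlen, rfl⟩⟩⟩
    · intro x hx
      rcases (mem_charSet ls c x).mp hx with ⟨line, hl, hcon⟩
      rcases hcon with ⟨hlen, rfl⟩ | ⟨h1, hlen, rfl⟩ | ⟨hlen, rfl⟩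
      · exact hcc line hl hlen
      · rcases h01 with h0 | h0
        · omega
        · rw [blankD_iff ls (c - 1) hbound] at h0
          exact h0 line hl hlen
      · exact hc1 line hl hlen

-- A's cell-blanking pass, read back per index
lemma getElem?_blankCols (cols : List Nat) (cells : List (List Char)) (i : Nat) :
    (pvA_blankCols cells cols)[i]? = cells[i]?.map (fun cell => if i ∈ cols then [] else cell) := by
  induction cols generalizing cells with
  | nil => simp [pvA_blankCols]
  | cons col t ih =>
    have hstep : pvA_blankCols cells (col :: t) =
        pvA_blankCols (if col < cells.length then cells.set col [] else cells) t := rfl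
    rw [hstep, ih]
    by_cases hlen : i < cells.length
    · have hget : (if col < cells.length then cells.set col [] else cells)[i]? =
          some (if col = i ∧ col < cells.length then [] else cells[i]) := by
        split_ifs with h1 h2 h2
        · rw [List.getElem?_set]
          simp [h2.1, hlen]
        · rw [List.getElem?_set]
          have : ¬ col = i := fun h => h2 ⟨h, h1⟩
          simp [this, List.getElem?_eq_getElem hlen]
        · omega
        · simp [List.getElem?_eq_getElem hlen]
      rw [hget, List.getElem?_eq_getElem hlen]
      simp only [Option.map_some, List.mem_cons]
      by_cases hic : i = col
      · subst hic
        simp [hlen]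
      · have hci : ¬ col = i := fun h => hic h.symm
        simp [hci, hic]
    · have h1 : cells[i]? = none := List.getElem?_eq_none (by omega)
      have h2 : (if col < cells.length then cells.set col [] else cells)[i]? = none := by
        split_ifs <;> refine List.getElem?_eq_none (by first | (rw [List.length_set]; omega) | omega)
      simp [h1, h2]

lemma blankCols_eq (ln : List Char) (cols : List Nat) :
    pvA_blankCols (ln.map (fun c => [c])) cols =
      ln.zipIdx.map (fun p => if p.2 ∈ cols then [] else [p.1]) := by
  apply List.ext_getElem?
  intro i
  rw [getElem?_blankCols]
  by_cases hi : i < ln.length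
  · simp [List.getElem?_map, List.getElem?_zipIdx, List.getElem?_eq_getElem hi]
  · have h1 : ln[i]? = none := List.getElem?_eq_none (by omega)
    simp [List.getElem?_map, List.getElem?_zipIdx, h1]

-- joining the blanked cells is filtering the kept indices
lemma flatten_blank_filter (line : List Char) (n : Nat) (P : Nat → Bool) :
    ((line.zipIdx n).map (fun p => if P p.2 then ([] : List Char) else [p.1])).flatten =
      ((line.zipIdx n).filter (fun p => !P p.2)).map (·.1) := by
  induction line generalizing n with
  | nil => simp
  | cons c t ih =>
    simp only [List.zipIdx_cons, List.map_cons, List.flatten_cons, List.filter_cons]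
    by_cases h : P n <;> simp [h, ih]

-- per-line equality of the two rebuilds
lemma line_eq (ls : List (List Char)) (line : List Char) (hl : line ∈ ls) :
    (pvA_blankCols (line.map (fun c => [c]))
        (pvA_removeSet ls (((ls.map List.length).max?).getD 0))).flatten =
      ((line.zipIdx.filter (fun p =>
          pvB_keep ((List.range (((ls.map List.length).max?).getD 0)).map (pvB_blank ls)) p.2)).map (·.1)) := by
  set longest := ((ls.map List.length).max?).getD 0 with hlg
  set rem := pvA_removeSet ls longest with hrem
  have h1 : pvA_blankCols (line.map (fun c => [c])) rem =
      line.zipIdx.map (fun p => if decide (p.2 ∈ rem) = true then ([] : List Char) else [p.1]) := by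
    rw [blankCols_eq]
    apply List.map_congr_left
    intro p _
    by_cases h : p.2 ∈ rem <;> simp [h]
  rw [h1, flatten_blank_filter line 0 (fun i => decide (i ∈ rem))]
  congr 1
  apply List.filter_congr
  intro p hp
  have hplen : p.2 < line.length := by
    rcases p with ⟨x, i⟩
    have := List.mem_zipIdx hp
    simpa using this.2.1
  have hlt : p.2 < longest := Nat.lt_of_lt_of_le hplen (length_le_longest ls line hl)
  have hw := remove_iff_window ls p.2 hlt
  by_cases h : p.2 ∈ rem
  · simp [h]
    exact hw.mp h
  · have hk : pvB_keep ((List.range longest).map (pvB_blank ls)) p.2 = true := by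
      by_contra hk
      exact h (hw.mpr (by simpa using hk))
    simp [h, hk]

-- ===== VERDICT (by name: the statement is the Claim_ definition above) =====
theorem remove_unneccesary_columns_spec : Claim_equal_remove_unneccesary_columns := by
  intro lines _ _
  unfold Spec_remove_unneccesary_columns remove_unneccesary_columns remove_unneccesary_columns_alt
  simp only []
  apply List.map_congr_left
  intro line hl
  rw [line_eq (lines.map String.toList) line hl]
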